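-- pv_equiv track=rewrite | github.com/ia-satma/ReplicarIA | backend/services/kb_chunkers.py | _extract_rubro
-- ===== SOURCE A (Python) =====
-- def _extract_rubro(text: str) -> str:
--     """Extract the rubro (heading) from jurisprudence"""
--     lines = text.split('\n')
--     rubro_lines = []
--     for line in lines:
--         line = line.strip()
--         if line and line.isupper():
--             rubro_lines.append(line)
--         elif rubro_lines:
--             break
--     return ' '.join(rubro_lines)
-- ===== SOURCE B (Python) =====
-- from itertools import groupby
--
--
-- def _extract_rubro(text: str) -> str:
--     # Partition the stripped lines into maximal runs of constant "is heading"
--     # value and return the first heading run.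
--     stripped = (line.strip() for line in text.split('\n'))
--     for is_heading, run in groupby(stripped, key=lambda t: bool(t) and t.isupper()):
--         if is_heading:
--             return ' '.join(run)
--     return ''
-- ===== Notes on version B (the rewrite author's own statement) =====
-- stated objective: idiomatic
-- what changed: Instead of A's accumulator/break loop, B partitions the stripped lines into maximal runs of constant heading-ness with itertools.groupby and returns the join of the first heading run (or '' if none).
import Mathlib
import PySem

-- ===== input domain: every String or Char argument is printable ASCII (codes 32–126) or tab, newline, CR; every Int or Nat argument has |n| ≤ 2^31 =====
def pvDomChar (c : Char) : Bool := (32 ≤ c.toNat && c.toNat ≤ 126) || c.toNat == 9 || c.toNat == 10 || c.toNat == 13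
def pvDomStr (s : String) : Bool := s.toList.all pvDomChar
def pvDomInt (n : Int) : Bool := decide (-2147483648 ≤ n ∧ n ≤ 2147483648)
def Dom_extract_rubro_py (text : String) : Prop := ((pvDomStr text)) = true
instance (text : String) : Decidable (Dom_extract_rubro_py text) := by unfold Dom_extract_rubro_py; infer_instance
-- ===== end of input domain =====

-- B replaces A's accumulator/break loop by grouping the stripped lines into maximal
-- runs of constant heading-ness (itertools.groupby) and joining the first heading run.

-- shared primitive: Python str.isupper, exact on the ASCII domain (cased char = letter):
-- at least one cased char and no lowercase cased char
def pyStrIsupper (s : String) : Bool :=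
  s.toList.any PySem.Chars.isupper && !(s.toList.any PySem.Chars.islower)

-- ===== PORT A =====
-- the for-loop with `break`: structural recursion over the lines with the rubro_lines accumulator
def extract_rubro_py_loop : List String → List String → List String
  | [], acc => acc
  | l :: rest, acc =>
      let line := PySem.Str.strip l
      if line ≠ "" && pyStrIsupper line then
        extract_rubro_py_loop rest (acc ++ [line])
      else if acc ≠ [] then acc
      else extract_rubro_py_loop rest acc

def extract_rubro_py (text : String) : String :=
  let lines := (PySem.Str.split? text "\n").getD []
  PySem.Str.join " " (extract_rubro_py_loop lines [])

-- ===== PORT B =====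
-- Source B's groupby key: bool(t) and t.isupper()
def extract_rubro_py_alt_pred (t : String) : Bool := t ≠ "" && pyStrIsupper t

-- itertools.groupby over the key: maximal runs of constant key value, left to right
def extract_rubro_py_alt_runs : List String → List (Bool × List String)
  | [] => []
  | t :: rest =>
      let b := extract_rubro_py_alt_pred t
      (b, t :: rest.takeWhile (fun x => extract_rubro_py_alt_pred x == b)) ::
        extract_rubro_py_alt_runs (rest.dropWhile (fun x => extract_rubro_py_alt_pred x == b))
termination_by l => l.length
decreasing_by
  simpa using Nat.lt_succ_of_le (List.length_dropWhile_le _ _)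

-- Source B's for-loop over the groups: return the first heading run, else ''
def extract_rubro_py_alt_first : List (Bool × List String) → String
  | [] => ""
  | (b, g) :: gs => if b then PySem.Str.join " " g else extract_rubro_py_alt_first gs

def extract_rubro_py_alt (text : String) : String :=
  let stripped := ((PySem.Str.split? text "\n").getD []).map PySem.Str.strip
  extract_rubro_py_alt_first (extract_rubro_py_alt_runs stripped)

-- ===== PRECONDITION & SPEC =====
-- A returns normally on every input (Pre_ excludes nothing); it records the intended inputs:
-- jurisprudence text opening, after optional noise lines, with uppercase heading lines.
def Pre_extract_rubro_py (text : String) : Prop := True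
instance (text : String) : Decidable (Pre_extract_rubro_py text) := by unfold Pre_extract_rubro_py; infer_instance
def pvWitness_extract_rubro_py : String := "RUBRO DE PRUEBA\nSEGUNDA LINEA\ncuerpo del texto"

def Spec_extract_rubro_py (text : String) (out : String) : Prop := out = extract_rubro_py_alt text
instance (text : String) (out : String) : Decidable (Spec_extract_rubro_py text out) := by unfold Spec_extract_rubro_py; infer_instance

-- ===== CLAIM (what is proved, stated in full; the proofs are below) =====
def Claim_equal_extract_rubro_py : Prop := ∀ (text : String), Dom_extract_rubro_py text → Pre_extract_rubro_py text → Spec_extract_rubro_py text (extract_rubro_py text)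

-- ===== LEMMAS AND PROOFS =====

theorem extract_rubro_dropWhile_idem (p : String → Bool) (l : List String) :
    (l.dropWhile p).dropWhile p = l.dropWhile p := by
  induction l with
  | nil => rfl
  | cons x xs ih =>
    by_cases h : p x = true
    · simp [h, ih]
    · simp [h]

theorem extract_rubro_pred_def (t : String) :
    (t ≠ "" && pyStrIsupper t) = extract_rubro_py_alt_pred t := rfl

-- once collection has started (acc ≠ []), A's loop appends exactly the takeWhile of the rest
theorem extract_rubro_py_loop_collect (ms : List String) (acc : List String) (h : acc ≠ []) :
    extract_rubro_py_loop ms acc = acc ++ (ms.map PySem.Str.strip).takeWhile extract_rubro_py_alt_pred := by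
  induction ms generalizing acc with
  | nil => simp [extract_rubro_py_loop]
  | cons l rest ih =>
    simp only [extract_rubro_py_loop, List.map_cons, List.takeWhile_cons,
      extract_rubro_pred_def]
    by_cases hp : extract_rubro_py_alt_pred (PySem.Str.strip l) = true
    · simp [hp, ih _ (by simp : acc ++ [PySem.Str.strip l] ≠ [])]
    · simp [hp, h]

-- B's groupby-then-first is the takeWhile of the dropWhile of the stripped lines
theorem extract_rubro_first_runs_eq (xs : List String) :
    extract_rubro_py_alt_first (extract_rubro_py_alt_runs xs) =
      PySem.Str.join " "
        ((xs.dropWhile (fun t => !extract_rubro_py_alt_pred t)).takeWhile extract_rubro_py_alt_pred) := by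
  induction hn : xs.length using Nat.strong_induction_on generalizing xs with
  | _ n ih =>
    cases xs with
    | nil => simp [extract_rubro_py_alt_runs, extract_rubro_py_alt_first, PySem.Str.join]
    | cons t rest =>
      rw [extract_rubro_py_alt_runs]
      by_cases hp : extract_rubro_py_alt_pred t = true
      · simp [extract_rubro_py_alt_first, hp]
      · have hp' : extract_rubro_py_alt_pred t = false := by
          simpa using hp
        have hlen : (rest.dropWhile (fun x => extract_rubro_py_alt_pred x == false)).length < n := by
          subst hn
          simpa using Nat.lt_succ_of_le (List.length_dropWhile_le _ _)
        have := ih _ hlen (rest.dropWhile (fun x => extract_rubro_py_alt_pred x == false)) rfl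
        simp only [extract_rubro_py_alt_first, hp', this]
        have hq : (fun x => extract_rubro_py_alt_pred x == false) =
            (fun t => !extract_rubro_py_alt_pred t) := by
          funext x; cases extract_rubro_py_alt_pred x <;> rfl
        rw [hq, List.dropWhile_cons, hp', extract_rubro_dropWhile_idem]
        simp

-- before collection starts (acc = []), A's loop is also that composition
theorem extract_rubro_py_loop_eq (ms : List String) :
    extract_rubro_py_loop ms [] =
      ((ms.map PySem.Str.strip).dropWhile (fun t => !extract_rubro_py_alt_pred t)).takeWhile
        extract_rubro_py_alt_pred := by
  induction ms with
  | nil => simp [extract_rubro_py_loop]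
  | cons l rest ih =>
    simp only [extract_rubro_py_loop, List.map_cons, List.dropWhile_cons,
      extract_rubro_pred_def]
    by_cases hp : extract_rubro_py_alt_pred (PySem.Str.strip l) = true
    · simp [hp, extract_rubro_py_loop_collect rest [PySem.Str.strip l] (by simp)]
    · simp [hp, ih]

-- ===== VERDICT (by name: the statement is the Claim_ definition above) =====
theorem extract_rubro_py_spec : Claim_equal_extract_rubro_py := by
  intro text _ _
  unfold Spec_extract_rubro_py extract_rubro_py extract_rubro_py_alt
  simp only []
  rw [extract_rubro_first_runs_eq, extract_rubro_py_loop_eq]
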